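-- pv_equiv track=rewrite | github.com/jrel/RandomDev | Projeto Ferreira/main 3.py | neighborhood
-- ===== SOURCE A (Python) =====
-- def neighborhood(iterable):
--     iterator = iter(iterable)
--     prev_item = iterable[len(iterable)-1]
--     current_item = next(iterator)  # throws StopIteration if empty.
--     for next_item in iterator:
--         yield (prev_item, current_item, next_item)
--         prev_item = current_item
--         current_item = next_item
--     yield (prev_item, current_item, iterable[len(iterable)-len(iterable)])
-- ===== SOURCE B (Python) =====
-- def neighborhood(iterable):
--     # different decomposition: zip the sequence with its two rotations
--     # (generator, so the endpoint accesses stay lazy like A's)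
--     prevs = [iterable[-1]] + list(iterable[:-1])
--     nexts = list(iterable[1:]) + [iterable[0]]
--     for t in zip(prevs, iterable, nexts):
--         yield t
-- ===== Notes on version B (the rewrite author's own statement) =====
-- stated objective: alternative
-- what changed: B replaces A's explicit prev/current state machine over an iterator by zipping the sequence with its two rotations ([last]+init and tail+[first]).
import Mathlib
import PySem

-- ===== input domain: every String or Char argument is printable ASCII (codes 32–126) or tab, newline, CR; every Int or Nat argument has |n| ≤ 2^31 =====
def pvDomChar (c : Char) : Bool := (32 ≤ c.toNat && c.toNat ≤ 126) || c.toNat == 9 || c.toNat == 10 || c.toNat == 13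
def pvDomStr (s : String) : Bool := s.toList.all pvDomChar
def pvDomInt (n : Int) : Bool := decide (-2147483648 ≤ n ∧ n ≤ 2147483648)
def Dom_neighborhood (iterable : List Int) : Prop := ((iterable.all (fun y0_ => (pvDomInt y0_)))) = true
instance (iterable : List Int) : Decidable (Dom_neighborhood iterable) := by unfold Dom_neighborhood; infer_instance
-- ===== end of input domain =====

-- B zips the sequence with its two rotations instead of A's prev/current state machine; return-value equivalence on nonempty lists.


-- ===== PORT A =====
-- the for-loop over the iterator, carrying (prev_item, current_item); firstv is iterable[0] for the final yield
def neighborhoodLoop (firstv prev cur : Int) : List Int → List (Int × Int × Int)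
  | [] => [(prev, cur, firstv)]
  | n :: rest => (prev, cur, n) :: neighborhoodLoop firstv cur n rest

def neighborhood (iterable : List Int) : List (Int × Int × Int) :=
  match iterable with
  | [] => []  -- Python raises IndexError here; excluded by Pre_
  | x :: xs => neighborhoodLoop x (xs.getLastD x) x xs
  -- xs.getLastD x = iterable[len-1]; x = iterable[len-len] = iterable[0]

-- ===== PORT B =====
def neighborhood_alt (iterable : List Int) : List (Int × Int × Int) :=
  match PySem.List.pyGet? iterable (-1), PySem.List.pyGet? iterable 0 with
  | some lastv, some firstv =>
      let prevs := lastv :: PySem.List.slice iterable none (some (-1))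
      let nexts := PySem.List.slice iterable (some 1) none ++ [firstv]
      List.zipWith3 (fun p c n => (p, c, n)) prevs iterable nexts
  | _, _ => []  -- Python raises IndexError here; excluded by Pre_

-- ===== PRECONDITION & SPEC =====
-- A (and B) raise IndexError on the empty sequence, so it is excluded.
def Pre_neighborhood (iterable : List Int) : Prop := iterable ≠ []
instance (iterable : List Int) : Decidable (Pre_neighborhood iterable) := by unfold Pre_neighborhood; infer_instance
def pvWitness_neighborhood : List Int := ([1, 2, 3])
def Spec_neighborhood (iterable : List Int) (out : List (Int × Int × Int)) : Prop := out = neighborhood_alt iterable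
instance (iterable : List Int) (out : List (Int × Int × Int)) : Decidable (Spec_neighborhood iterable out) := by unfold Spec_neighborhood; infer_instance

-- ===== CLAIM (what is proved, stated in full; the proofs are below) =====
def Claim_equal_neighborhood : Prop := ∀ (iterable : List Int), Dom_neighborhood iterable → Pre_neighborhood iterable → Spec_neighborhood iterable (neighborhood iterable)

-- ===== LEMMAS AND PROOFS =====

theorem neighborhoodLoop_eq_zipWith3 (xs : List Int) : ∀ (firstv prev cur : Int),
    neighborhoodLoop firstv prev cur xs =
      List.zipWith3 (fun p c n => (p, c, n)) (prev :: (cur :: xs).dropLast) (cur :: xs) (xs ++ [firstv]) := by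
  induction xs with
  | nil => intro firstv prev cur; simp [neighborhoodLoop, List.zipWith3]
  | cons n rest ih =>
      intro firstv prev cur
      simp [neighborhoodLoop, List.zipWith3, ih]

-- ===== VERDICT (by name: the statement is the Claim_ definition above) =====
theorem neighborhood_spec : Claim_equal_neighborhood := by
  intro iterable _ hpre
  unfold Spec_neighborhood
  match iterable with
  | [] => exact absurd rfl hpre
  | x :: xs =>
      have h1 : PySem.List.pyGet? (x :: xs) (-1) = some ((x :: xs).getLast (by simp)) := by
        rw [PySem.List.pyGet?_neg_one]
        simp [List.getLast?_eq_some_getLast]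
      have h2 : PySem.List.pyGet? (x :: xs) 0 = some x := PySem.List.pyGet?_zero_cons x xs
      simp only [neighborhood, neighborhood_alt, h1, h2,
        PySem.List.slice_to_neg_one, PySem.List.slice_from_one,
        neighborhoodLoop_eq_zipWith3]
      congr 1
      cases xs with
      | nil => simp
      | cons y ys => simp [List.getLastD_eq_getLast?, List.getLast?_eq_some_getLast (l := y :: ys)]
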